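-- pv_equiv track=rewrite | github.com/MolfarUA/CodeWars_Solutions | 6 kyu/Survivors Ep.4/solution.py | survivors
-- ===== SOURCE A (Python) =====
-- def survivors(list_of_momentum, list_of_powerups):
--     lst = []
--     for i in range(len(list_of_momentum)):
--         mom = list_of_momentum[i]
--         if not mom:
--             continue
--         for x in list_of_powerups[i]:
--             mom = mom - 1 + x
--             if mom < 1:
--                 break
--         if mom >= 1:
--             lst.append(i)
--     return lst
-- ===== SOURCE B (Python) =====
-- def survivors(list_of_momentum, list_of_powerups):
--     result = []
--     for i, mom in enumerate(list_of_momentum):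
--         if not mom:
--             continue
--         partials = [mom]
--         for x in list_of_powerups[i]:
--             partials.append(partials[-1] - 1 + x)
--         if all(p >= 1 for p in partials[1:]) and partials[-1] >= 1:
--             result.append(i)
--     return result
-- ===== Notes on version B (the rewrite author's own statement) =====
-- stated objective: alternative
-- what changed: A mutates a running momentum with an early break inside each index's scan; B materializes the full list of partial momenta (an accumulate/scan table) and decides survival with an all()-test over the tail plus a last-value check.
import Mathlib
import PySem

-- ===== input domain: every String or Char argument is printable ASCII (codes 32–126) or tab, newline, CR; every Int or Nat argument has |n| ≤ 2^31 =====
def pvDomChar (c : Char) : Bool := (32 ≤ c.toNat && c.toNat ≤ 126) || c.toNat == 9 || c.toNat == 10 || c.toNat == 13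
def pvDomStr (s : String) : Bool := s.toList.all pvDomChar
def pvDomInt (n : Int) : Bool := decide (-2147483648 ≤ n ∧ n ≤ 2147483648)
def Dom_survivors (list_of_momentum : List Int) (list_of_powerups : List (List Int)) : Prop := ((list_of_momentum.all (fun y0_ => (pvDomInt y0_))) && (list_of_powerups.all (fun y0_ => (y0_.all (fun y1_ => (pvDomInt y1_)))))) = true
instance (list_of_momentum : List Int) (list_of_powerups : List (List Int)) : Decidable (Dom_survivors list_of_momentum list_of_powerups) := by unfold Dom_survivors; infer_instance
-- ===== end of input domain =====

-- B replaces A's early-exit scan with a mutated running momentum by materializing the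
-- full list of partial momenta and deciding survival with an all()-test (objective: alternative).

-- ===== PORT A =====
-- inner 'for x in ups: mom = mom - 1 + x; if mom < 1: break'
def survivorsLoop (mom : Int) (ups : List Int) : Int :=
  match ups with
  | [] => mom
  | x :: rest =>
    let m := mom - 1 + x
    if m < 1 then m else survivorsLoop m rest

def survivors (list_of_momentum : List Int) (list_of_powerups : List (List Int)) : List Int :=
  (PySem.List.pyRange 0 (list_of_momentum.length : Int) 1).foldl (fun lst i =>
    let mom := PySem.List.pyGetD list_of_momentum i 0
    if mom = 0 then lst  -- 'if not mom: continue'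
    else
      let m := survivorsLoop mom (PySem.List.pyGetD list_of_powerups i [])
      if 1 ≤ m then lst ++ [i] else lst) []

-- ===== PORT B =====
def survivors_alt (list_of_momentum : List Int) (list_of_powerups : List (List Int)) : List Int :=
  (PySem.List.enumerate list_of_momentum).foldl (fun result e =>
    if e.2 = 0 then result  -- 'if not mom: continue'
    else
      -- partials = [mom]; for x in …: partials.append(partials[-1] - 1 + x)
      let partials := (PySem.List.pyGetD list_of_powerups e.1 []).foldl
        (fun ps x => ps ++ [PySem.List.pyGetD ps (-1) 0 - 1 + x]) [e.2]
      if (PySem.List.slice partials (some 1) none).all (fun p => decide (1 ≤ p))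
         && decide (1 ≤ PySem.List.pyGetD partials (-1) 0)
      then result ++ [e.1] else result) []

-- ===== PRECONDITION & SPEC =====
-- Pre_ excludes exactly the inputs on which A raises IndexError: an index i with a
-- truthy momentum but no i-th entry in list_of_powerups.
def Pre_survivors (list_of_momentum : List Int) (list_of_powerups : List (List Int)) : Prop :=
  ∀ i < list_of_momentum.length, list_of_momentum.getD i 0 ≠ 0 → i < list_of_powerups.length
instance (list_of_momentum : List Int) (list_of_powerups : List (List Int)) : Decidable (Pre_survivors list_of_momentum list_of_powerups) := by unfold Pre_survivors; infer_instance

def pvWitness_survivors : List Int × List (List Int) := ([2, 0, -1], [[0, 3], [], [1]])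

def Spec_survivors (list_of_momentum : List Int) (list_of_powerups : List (List Int)) (out : List Int) : Prop := out = survivors_alt list_of_momentum list_of_powerups
instance (list_of_momentum : List Int) (list_of_powerups : List (List Int)) (out : List Int) : Decidable (Spec_survivors list_of_momentum list_of_powerups out) := by unfold Spec_survivors; infer_instance

-- ===== CLAIM (what is proved, stated in full; the proofs are below) =====
def Claim_equal_survivors : Prop := ∀ (list_of_momentum : List Int) (list_of_powerups : List (List Int)), Dom_survivors list_of_momentum list_of_powerups → Pre_survivors list_of_momentum list_of_powerups → Spec_survivors list_of_momentum list_of_powerups (survivors list_of_momentum list_of_powerups)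

-- ===== LEMMAS AND PROOFS =====

-- B's partials-building loop produces a scanl of the step function.
theorem partials_eq_scanl (ups : List Int) : ∀ (pre : List Int) (a : Int),
    ups.foldl (fun ps x => ps ++ [PySem.List.pyGetD ps (-1) 0 - 1 + x]) (pre ++ [a])
      = pre ++ List.scanl (fun m x => m - 1 + x) a ups := by
  induction ups with
  | nil => intro pre a; simp [List.scanl_nil]
  | cons x rest ih =>
    intro pre a
    simp only [List.foldl_cons, PySem.List.pyGetD_neg_one_append_singleton]
    rw [ih (pre ++ [a]) (a - 1 + x)]
    simp [List.scanl_cons]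

theorem scanl_eq_cons (f : Int → Int → Int) (b : Int) (l : List Int) :
    ∃ t, List.scanl f b l = b :: t := by
  cases l with
  | nil => exact ⟨[], rfl⟩
  | cons a t => exact ⟨_, List.scanl_cons⟩

-- Core: A's early-exit loop survives iff every later partial (and the last) is ≥ 1.
theorem loop_iff_partials (ups : List Int) : ∀ (mom : Int),
    (1 ≤ survivorsLoop mom ups)
      ↔ ((List.scanl (fun m x => m - 1 + x) mom ups).tail.all (fun p => decide (1 ≤ p)) = true
          ∧ 1 ≤ PySem.List.pyGetD (List.scanl (fun m x => m - 1 + x) mom ups) (-1) 0) := by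
  induction ups with
  | nil =>
    intro mom
    have h1 : PySem.List.pyGetD ([mom] : List Int) (-1) 0 = mom :=
      PySem.List.pyGetD_neg_one_append_singleton [] mom 0
    simp [survivorsLoop, List.scanl_nil, h1]
  | cons x rest ih =>
    intro mom
    have hunf : survivorsLoop mom (x :: rest)
        = if mom - 1 + x < 1 then mom - 1 + x else survivorsLoop (mom - 1 + x) rest := rfl
    obtain ⟨L', hL'⟩ := scanl_eq_cons (fun m x => m - 1 + x) (mom - 1 + x) rest
    have hne : List.scanl (fun m x => m - 1 + x) (mom - 1 + x) rest ≠ [] := List.scanl_ne_nil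
    have hlast : PySem.List.pyGetD (mom :: List.scanl (fun m x => m - 1 + x) (mom - 1 + x) rest) (-1) 0
        = PySem.List.pyGetD (List.scanl (fun m x => m - 1 + x) (mom - 1 + x) rest) (-1) 0 := by
      rw [PySem.List.pyGetD_neg_one _ 0 (List.cons_ne_nil _ _), PySem.List.pyGetD_neg_one _ 0 hne,
          List.getLast_cons hne]
    rw [hunf, List.scanl_cons, List.tail_cons, hlast]
    by_cases h : mom - 1 + x < 1
    · rw [if_pos h]
      constructor
      · intro habs; omega
      · rintro ⟨hall, _⟩
        rw [hL'] at hall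
        simp [List.all_cons] at hall
        omega
    · rw [if_neg h, ih (mom - 1 + x)]
      have htail : (List.scanl (fun m x => m - 1 + x) (mom - 1 + x) rest).tail = L' := by
        rw [hL', List.tail_cons]
      rw [htail, hL']
      simp [List.all_cons]
      intro _ _
      omega

-- The two loop bodies agree on every index, for every accumulator.
theorem body_agree (lm : List Int) (lp : List (List Int)) (acc : List Int) (i : Int) :
    (let mom := PySem.List.pyGetD lm i 0
     if mom = 0 then acc
     else
       let m := survivorsLoop mom (PySem.List.pyGetD lp i [])
       if 1 ≤ m then acc ++ [i] else acc)
    = (if (PySem.List.pyGetD lm i 0) = 0 then acc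
       else
         let partials := (PySem.List.pyGetD lp i []).foldl
           (fun ps x => ps ++ [PySem.List.pyGetD ps (-1) 0 - 1 + x]) [PySem.List.pyGetD lm i 0]
         if (PySem.List.slice partials (some 1) none).all (fun p => decide (1 ≤ p))
            && decide (1 ≤ PySem.List.pyGetD partials (-1) 0)
         then acc ++ [i] else acc) := by
  set mom := PySem.List.pyGetD lm i 0 with hmom
  by_cases h0 : mom = 0
  · simp [h0]
  · simp only [if_neg h0]
    set ups := PySem.List.pyGetD lp i [] with hups
    have hp : ups.foldl (fun ps x => ps ++ [PySem.List.pyGetD ps (-1) 0 - 1 + x]) [mom]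
        = List.scanl (fun m x => m - 1 + x) mom ups := by
      have := partials_eq_scanl ups [] mom
      simpa using this
    rw [hp, PySem.List.slice_from_one]
    by_cases hs : 1 ≤ survivorsLoop mom ups
    · rw [if_pos hs]
      have hc := (loop_iff_partials ups mom).mp hs
      rw [if_pos (by simp [hc.1, hc.2])]
    · rw [if_neg hs, if_neg ?_]
      intro hc
      simp only [Bool.and_eq_true, decide_eq_true_eq] at hc
      exact hs ((loop_iff_partials ups mom).mpr ⟨hc.1, hc.2⟩)

-- ===== VERDICT (by name: the statement is the Claim_ definition above) =====
theorem survivors_spec : Claim_equal_survivors := by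
  intro lm lp _ _
  unfold Spec_survivors survivors survivors_alt
  rw [PySem.List.enumerate_eq_map_pyRange lm 0, List.foldl_map]
  simp only [PySem.List.len_eq]
  exact PySem.List.foldl_congr_mem _ _ _ []
    (fun acc i _ => body_agree lm lp acc i)
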